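-- pv_equiv track=rewrite | github.com/stevenrichter16/gitreader-ui | app/gitreader/tour.py | _select_arc
-- ===== SOURCE A (Python) =====
-- from typing import Dict, List, Optional, Tuple
--
-- def _select_arc(arcs: List[dict], arc_id: Optional[str]) -> Optional[dict]:
--     if arc_id:
--         for arc in arcs:
--             if arc.get('id') == arc_id:
--                 return arc
--     main_arcs = [arc for arc in arcs if arc.get('thread') == 'main']
--     if main_arcs:
--         return main_arcs[0]
--     return arcs[0] if arcs else None
-- ===== SOURCE B (Python) =====
-- from typing import Dict, List, Optional, Tuple
--
-- def _select_arc(arcs: List[dict], arc_id: Optional[str]) -> Optional[dict]: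
--     first_main = None
--     for arc in arcs:
--         if arc_id and arc.get('id') == arc_id:
--             return arc
--         if first_main is None and arc.get('thread') == 'main':
--             first_main = arc
--     if first_main is not None:
--         return first_main
--     return arcs[0] if arcs else None
-- ===== Notes on version B (the rewrite author's own statement) =====
-- stated objective: alternative
-- what changed: Fuses A's two scans (id search, then a filter building the whole main-arcs list) into one pass that early-returns on an id match and tracks only the first main arc in an accumulator.
import Mathlib
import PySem

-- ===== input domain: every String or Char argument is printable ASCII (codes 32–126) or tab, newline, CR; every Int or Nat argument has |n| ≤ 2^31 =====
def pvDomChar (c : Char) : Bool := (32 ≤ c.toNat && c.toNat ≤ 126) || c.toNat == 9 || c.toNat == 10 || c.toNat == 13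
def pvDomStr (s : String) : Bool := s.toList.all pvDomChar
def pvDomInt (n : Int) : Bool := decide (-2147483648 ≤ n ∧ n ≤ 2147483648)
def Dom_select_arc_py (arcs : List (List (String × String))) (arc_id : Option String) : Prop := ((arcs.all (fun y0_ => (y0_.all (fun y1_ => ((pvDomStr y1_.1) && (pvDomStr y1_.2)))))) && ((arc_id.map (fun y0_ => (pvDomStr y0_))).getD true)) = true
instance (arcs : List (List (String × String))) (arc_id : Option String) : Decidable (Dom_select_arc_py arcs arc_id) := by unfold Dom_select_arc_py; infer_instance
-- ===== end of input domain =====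

-- B fuses A's two scans into one pass with a first-main accumulator (alternative decomposition, same O(n) cost).


-- ===== PORT A =====
def select_arc_py (arcs : List (List (String × String))) (arc_id : Option String) : Option (List (String × String)) :=
  let idResult : Option (List (String × String)) :=
    match arc_id with
    | some s =>
        if s ≠ "" then arcs.find? (fun arc => (PySem.Dict.mk arc).get? "id" == some s)
        else none
    | none => none
  match idResult with
  | some arc => some arc
  | none =>
      let main_arcs := arcs.filter (fun arc => (PySem.Dict.mk arc).get? "thread" == some "main")
      match main_arcs with
      | arc :: _ => some arc
      | [] => arcs.head?

-- ===== PORT B =====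
-- `arc_id and arc.get('id') == arc_id`: a falsy (None/empty) arc_id never matches
def pvIdMatch (arc_id : Option String) (arc : List (String × String)) : Bool :=
  match arc_id with
  | some s => decide (s ≠ "") && ((PySem.Dict.mk arc).get? "id" == some s)
  | none => false

def pvIsMain (arc : List (String × String)) : Bool :=
  (PySem.Dict.mk arc).get? "thread" == some "main"

-- B's single loop: early return on an id match, else track the first main arc
def pvSelectLoop (arc_id : Option String) (first_main : Option (List (String × String))) :
    List (List (String × String)) → Option (List (String × String))
  | [] => first_main
  | arc :: rest =>
      if pvIdMatch arc_id arc then some arc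
      else pvSelectLoop arc_id
        (if first_main.isNone && pvIsMain arc then some arc else first_main) rest

def select_arc_py_alt (arcs : List (List (String × String))) (arc_id : Option String) : Option (List (String × String)) :=
  match pvSelectLoop arc_id none arcs with
  | some arc => some arc
  | none => arcs.head?

-- ===== PRECONDITION & SPEC =====
def Spec_select_arc_py (arcs : List (List (String × String))) (arc_id : Option String) (out : Option (List (String × String))) : Prop := out = select_arc_py_alt arcs arc_id
instance (arcs : List (List (String × String))) (arc_id : Option String) (out : Option (List (String × String))) : Decidable (Spec_select_arc_py arcs arc_id out) := by unfold Spec_select_arc_py; infer_instance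

-- ===== CLAIM (what is proved, stated in full; the proofs are below) =====
def Claim_equal_select_arc_py : Prop := ∀ (arcs : List (List (String × String))) (arc_id : Option String), Dom_select_arc_py arcs arc_id → Spec_select_arc_py arcs arc_id (select_arc_py arcs arc_id)

-- ===== LEMMAS AND PROOFS =====


theorem pvSelectLoop_eq (arc_id : Option String) :
    ∀ (arcs : List (List (String × String))) (fm : Option (List (String × String))),
      pvSelectLoop arc_id fm arcs =
        match arcs.find? (pvIdMatch arc_id) with
        | some a => some a
        | none => fm.or ((arcs.filter pvIsMain).head?)
  | [], fm => by cases fm <;> simp [pvSelectLoop, Option.or]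
  | arc :: rest, fm => by
      by_cases h : pvIdMatch arc_id arc
      · simp [pvSelectLoop, h, List.find?]
      · rw [pvSelectLoop, if_neg h]
        rw [pvSelectLoop_eq arc_id rest]
        cases hfm : fm <;> by_cases hm : pvIsMain arc <;>
          simp [List.find?, h, hm, Option.or, ]

theorem find?_idMatch (s : String) (hs : s ≠ "") :
    ∀ (arcs : List (List (String × String))),
      arcs.find? (pvIdMatch (some s)) =
        arcs.find? (fun arc => (PySem.Dict.mk arc).get? "id" == some s)
  | [] => rfl
  | a :: t => by
      have h1 : pvIdMatch (some s) a = ((PySem.Dict.mk a).get? "id" == some s) := by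
        simp [pvIdMatch, hs]
      simp only [List.find?, h1]
      cases ((PySem.Dict.mk a).get? "id" == some s) with
      | true => rfl
      | false => exact find?_idMatch s hs t

-- ===== VERDICT (by name: the statement is the Claim_ definition above) =====
theorem select_arc_py_spec : Claim_equal_select_arc_py := by
  intro arcs arc_id _
  unfold Spec_select_arc_py select_arc_py select_arc_py_alt
  rw [pvSelectLoop_eq]
  have htail :
      (match arcs.filter (fun arc => (PySem.Dict.mk arc).get? "thread" == some "main") with
        | arc :: _ => some arc
        | [] => arcs.head?) =
      (match (arcs.filter pvIsMain).head? with
        | some a => some a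
        | none => arcs.head?) := by
    show (match arcs.filter pvIsMain with
          | arc :: _ => some arc
          | [] => arcs.head?) = _
    cases arcs.filter pvIsMain <;> rfl
  cases arc_id with
  | none =>
      have hfind : arcs.find? (pvIdMatch none) = none :=
        List.find?_eq_none.mpr (by intro arc _; simp [pvIdMatch])
      simpa [hfind, Option.or] using htail
  | some s =>
      by_cases hs : s ≠ ""
      · have hfind : arcs.find? (pvIdMatch (some s)) =
            arcs.find? (fun arc => (PySem.Dict.mk arc).get? "id" == some s) :=
          find?_idMatch s hs arcs
        cases hf2 : arcs.find? (fun arc => (PySem.Dict.mk arc).get? "id" == some s) with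
        | some a => simp [hs, hf2, hfind]
        | none => simpa [hs, hf2, hfind, Option.or] using htail
      · have hfind : arcs.find? (pvIdMatch (some s)) = none :=
          List.find?_eq_none.mpr (by intro arc _; simp [pvIdMatch, hs])
        simpa [hs, hfind, Option.or] using htail
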